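-- pv_equiv track=rewrite | github.com/clacaputo/cms-reco-profiling | main.py | cleanStack
-- ===== SOURCE A (Python) =====
-- def cleanStack(stack):
--     new_stack = []
--     for s in stack:
--         if not s in new_stack and len(s)>0:
--             new_stack.append(s)
--         if s.endswith("doEvent"):
--             break
--         if s.endswith("beginRun"):
--             break
--         if s.endswith("edm::Factory::makeModule"):
--             break
--         if s.endswith("edm::EventProcessor::init"):
--             break
--     return new_stack
-- ===== SOURCE B (Python) =====
-- def cleanStack(stack):
--     # Two-pass decomposition: find the cutoff index first, then dedup the prefix.
--     markers = ("doEvent", "beginRun", "edm::Factory::makeModule",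
--                "edm::EventProcessor::init")
--     cut = len(stack)
--     for i, s in enumerate(stack):
--         if s.endswith(markers):
--             cut = i + 1
--             break
--     new_stack = []
--     seen = set()
--     for s in stack[:cut]:
--         if s and s not in seen:
--             seen.add(s)
--             new_stack.append(s)
--     return new_stack
-- ===== Notes on version B (the rewrite author's own statement) =====
-- stated objective: faster
-- what changed: Replaces the single interleaved append-and-break loop, whose 's in new_stack' test rescans the output list for every frame, by two separate passes: a search for the first marker frame fixing a cutoff index, then an order-preserving dedup of that prefix using a hash set, making membership O(1).
import Mathlib
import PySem

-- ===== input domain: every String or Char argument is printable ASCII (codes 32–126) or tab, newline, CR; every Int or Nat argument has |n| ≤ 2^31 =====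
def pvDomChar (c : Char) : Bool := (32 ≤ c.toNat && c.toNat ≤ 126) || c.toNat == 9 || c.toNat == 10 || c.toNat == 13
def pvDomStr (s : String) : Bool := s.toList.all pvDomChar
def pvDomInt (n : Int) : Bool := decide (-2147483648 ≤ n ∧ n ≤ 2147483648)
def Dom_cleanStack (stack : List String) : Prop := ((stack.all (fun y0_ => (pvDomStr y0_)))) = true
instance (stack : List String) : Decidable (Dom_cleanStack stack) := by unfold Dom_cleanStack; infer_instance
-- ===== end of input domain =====

-- ===== PORT A =====
-- B replaces the interleaved append-and-break loop by a marker search fixing a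
-- cutoff followed by a separate seen-set dedup of that prefix (alternative decomposition).
def cleanStackLoop (ns : List String) : List String → List String
  | [] => ns
  | s :: rest =>
    let ns' := if !ns.contains s && decide (PySem.Str.len s > 0) then ns ++ [s] else ns
    if PySem.Str.endswith s "doEvent" then ns'
    else if PySem.Str.endswith s "beginRun" then ns'
    else if PySem.Str.endswith s "edm::Factory::makeModule" then ns'
    else if PySem.Str.endswith s "edm::EventProcessor::init" then ns'
    else cleanStackLoop ns' rest

def cleanStack (stack : List String) : List String := cleanStackLoop [] stack

-- ===== PORT B =====
def pvMarker (s : String) : Bool :=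
  PySem.Str.endswith s "doEvent" || PySem.Str.endswith s "beginRun" ||
  PySem.Str.endswith s "edm::Factory::makeModule" ||
  PySem.Str.endswith s "edm::EventProcessor::init"

-- pass 1: index just past the first marker frame (len(stack) if none)
def pvFindCut : List String → Nat
  | [] => 0
  | s :: rest => if pvMarker s then 1 else 1 + pvFindCut rest

-- pass 2: order-preserving dedup skipping empty strings
def pvDedup (seen : PySem.Set String) (out : List String) : List String → List String
  | [] => out
  | s :: rest =>
    if decide (PySem.Str.len s ≠ 0) && !(PySem.Set.contains seen s) then
      pvDedup (PySem.Set.add seen s) (out ++ [s]) rest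
    else
      pvDedup seen out rest

def cleanStack_alt (stack : List String) : List String :=
  pvDedup PySem.Set.empty [] (stack.take (pvFindCut stack))

-- ===== PRECONDITION & SPEC =====
def Spec_cleanStack (stack : List String) (out : List String) : Prop := out = cleanStack_alt stack
instance (stack : List String) (out : List String) : Decidable (Spec_cleanStack stack out) := by unfold Spec_cleanStack; infer_instance

-- ===== CLAIM (what is proved, stated in full; the proofs are below) =====
def Claim_equal_cleanStack : Prop := ∀ (stack : List String), Dom_cleanStack stack → Spec_cleanStack stack (cleanStack stack)

-- ===== LEMMAS AND PROOFS =====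
theorem pvChain {α : Type} (e1 e2 e3 e4 : Bool) (a b : α) :
    (if e1 then a else if e2 then a else if e3 then a else if e4 then a else b)
      = (if (e1 || e2 || e3 || e4) then a else b) := by
  cases e1 <;> cases e2 <;> cases e3 <;> cases e4 <;> simp

theorem pvLenPos (s : String) :
    decide (PySem.Str.len s > 0) = decide (PySem.Str.len s ≠ 0) := by
  rw [decide_eq_decide, PySem.Str.len_eq]
  omega

theorem cleanStackLoop_cons (acc : List String) (s : String) (rest : List String) :
    cleanStackLoop acc (s :: rest) =
      (if pvMarker s then (if !acc.contains s && decide (PySem.Str.len s > 0) then acc ++ [s] else acc)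
       else cleanStackLoop (if !acc.contains s && decide (PySem.Str.len s > 0) then acc ++ [s] else acc) rest) := by
  rw [cleanStackLoop]
  exact pvChain _ _ _ _ _ _

theorem pvLoop_eq (stack : List String) :
    ∀ (acc seen : List String),
      (∀ x, acc.contains x = PySem.Set.contains seen x) →
      cleanStackLoop acc stack = pvDedup seen acc (stack.take (pvFindCut stack)) := by
  induction stack with
  | nil => intro acc seen _; simp [cleanStackLoop, pvFindCut, pvDedup]
  | cons s rest ih =>
    intro acc seen h
    have hcond : (decide (PySem.Str.len s ≠ 0) && !(PySem.Set.contains seen s))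
        = (!acc.contains s && decide (PySem.Str.len s > 0)) := by
      rw [pvLenPos, h s, Bool.and_comm]
    rw [cleanStackLoop_cons, pvFindCut]
    cases hm : pvMarker s with
    | true =>
      simp only [if_true, List.take_succ_cons, List.take_zero]
      rw [pvDedup, hcond]
      split <;> simp [pvDedup]
    | false =>
      simp only [if_false, Bool.false_eq_true, List.take_succ_cons, Nat.one_add]
      rw [pvDedup, hcond]
      by_cases hc : (!acc.contains s && decide (PySem.Str.len s > 0)) = true
      · rw [if_pos hc, if_pos hc]
        apply ih
        intro x
        have hacc : acc.contains s = false := by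
          rw [Bool.and_eq_true] at hc
          simpa using hc.1
        have hns : s ∉ seen := by
          have := (h s).symm.trans hacc
          simpa [PySem.Set.contains] using this
        have h' := h x
        simp only [PySem.Set.add, PySem.Set.contains] at h' ⊢
        simp at h'
        rw [if_neg (by simpa using hns)]
        simp [List.mem_append, h']
      · rw [if_neg hc, if_neg hc]
        exact ih acc seen h

-- ===== VERDICT (by name: the statement is the Claim_ definition above) =====
theorem cleanStack_spec : Claim_equal_cleanStack := by
  intro stack _
  show cleanStack stack = cleanStack_alt stack
  exact pvLoop_eq stack [] PySem.Set.empty (by intro x; rfl)
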